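-- pv_equiv track=rewrite | github.com/dywzju09-blip/cpg_generator_export | tools/verification/interproc_flags.py | _evaluate_guard_truth
-- ===== SOURCE A (Python) =====
-- from typing import Dict, Iterable, List, Optional, Set, Tuple
--
-- def _eval_simple_constraint(op: str, lhs: int, rhs: int) -> Optional[bool]:
--     if op == "==":
--         return lhs == rhs
--     if op == "!=":
--         return lhs != rhs
--     if op == ">":
--         return lhs > rhs
--     if op == ">=":
--         return lhs >= rhs
--     if op == "<":
--         return lhs < rhs
--     if op == "<=":
--         return lhs <= rhs
--     return None
--
-- def _evaluate_guard_truth(guard_constraints: List[dict], value_env: Dict[str, int]) -> str: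
--     if not guard_constraints:
--         return "unknown"
--     known = []
--     for cons in guard_constraints:
--         var = cons.get("variable")
--         if var not in value_env:
--             continue
--         try:
--             lhs = int(value_env[var])
--             rhs = int(cons.get("value"))
--         except Exception:
--             continue
--         res = _eval_simple_constraint(str(cons.get("operator")), lhs, rhs)
--         if res is not None:
--             known.append(res)
--     if not known:
--         return "unknown"
--     if all(known):
--         return "true"
--     if any(v is False for v in known):
--         return "false"
--     return "unknown"
-- ===== SOURCE B (Python) =====
-- def _evaluate_guard_truth(guard_constraints, value_env):
--     # Single pass with two flags; "false" dominates so we return it immediately.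
--     saw_valid = False
--     for cons in guard_constraints:
--         var = cons.get("variable")
--         if var not in value_env:
--             continue
--         try:
--             lhs = int(value_env[var])
--             rhs = int(cons.get("value"))
--         except Exception:
--             continue
--         # three-way comparison once, then a table keyed by the operator
--         cmp = (lhs > rhs) - (lhs < rhs)
--         table = {
--             "==": cmp == 0,
--             "!=": cmp != 0,
--             ">": cmp == 1,
--             ">=": cmp != -1,
--             "<": cmp == -1,
--             "<=": cmp != 1,
--         }
--         res = table.get(str(cons.get("operator")))
--         if res is None:
--             continue
--         if not res:
--             return "false"
--         saw_valid = True
--     return "true" if saw_valid else "unknown"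
-- ===== Notes on version B (the rewrite author's own statement) =====
-- stated objective: simpler
-- what changed: Replaces A's intermediate known-list plus separate all()/any() aggregation passes by a single short-circuiting loop carrying a saw_valid flag (returning "false" immediately), and the operator if-chain by a three-way comparison with a lookup table.
import Mathlib
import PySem

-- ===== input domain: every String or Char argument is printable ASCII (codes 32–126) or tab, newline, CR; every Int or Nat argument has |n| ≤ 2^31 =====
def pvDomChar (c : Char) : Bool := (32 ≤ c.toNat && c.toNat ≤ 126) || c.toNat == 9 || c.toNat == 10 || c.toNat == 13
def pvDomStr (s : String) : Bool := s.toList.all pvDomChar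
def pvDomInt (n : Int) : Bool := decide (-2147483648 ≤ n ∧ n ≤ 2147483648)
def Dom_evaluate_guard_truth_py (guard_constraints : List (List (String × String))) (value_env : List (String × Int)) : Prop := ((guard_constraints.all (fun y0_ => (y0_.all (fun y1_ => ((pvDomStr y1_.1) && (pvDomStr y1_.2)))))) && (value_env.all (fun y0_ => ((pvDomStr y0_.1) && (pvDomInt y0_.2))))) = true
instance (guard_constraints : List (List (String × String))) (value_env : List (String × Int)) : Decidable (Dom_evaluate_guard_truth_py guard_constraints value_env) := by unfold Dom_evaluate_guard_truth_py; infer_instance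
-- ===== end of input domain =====

-- B replaces A's list-collect + all/any aggregation by a single short-circuiting pass with a
-- saw_valid flag, and the operator if-chain by a three-way comparison plus a lookup table (objective: simpler).

-- ===== PORT A =====
def evalSimpleConstraintA (op : String) (lhs rhs : Int) : Option Bool :=
  if op == "==" then some (lhs == rhs)
  else if op == "!=" then some (lhs != rhs)
  else if op == ">" then some (decide (lhs > rhs))
  else if op == ">=" then some (decide (lhs ≥ rhs))
  else if op == "<" then some (decide (lhs < rhs))
  else if op == "<=" then some (decide (lhs ≤ rhs))
  else none

-- one iteration of A's for-loop body: appends the evaluated constraint to `known` or skips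
def guardStepA (value_env : List (String × Int)) (known : List Bool)
    (cons : List (String × String)) : List Bool :=
  match PySem.Dict.get? (PySem.Dict.mk cons) "variable" with
  | none => known                                   -- var is None, not a key of value_env
  | some var =>
    match PySem.Dict.get? (PySem.Dict.mk value_env) var with
    | none => known                                 -- var not in value_env
    | some lhs =>
      match PySem.Dict.get? (PySem.Dict.mk cons) "value" with
      | none => known                               -- int(None) raises TypeError → except → continue
      | some vs =>
        match PySem.Int.ofStr? vs with
        | none => known                             -- int(vs) ValueError → continue
        | some rhs =>
          let op := (PySem.Dict.get? (PySem.Dict.mk cons) "operator").getD "None"  -- str(None)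
          match evalSimpleConstraintA op lhs rhs with
          | none => known
          | some res => known ++ [res]

def evaluate_guard_truth_py (guard_constraints : List (List (String × String))) (value_env : List (String × Int)) : String :=
  if guard_constraints.isEmpty then "unknown"
  else
    let known := guard_constraints.foldl (guardStepA value_env) []
    if known.isEmpty then "unknown"
    else if known.all id then "true"
    else if known.any (fun v => v == false) then "false"
    else "unknown"

-- ===== PORT B =====
-- three-way comparison once, then a lookup table keyed by the operator (Python dict literal, distinct keys)
def evalOpB (op : String) (lhs rhs : Int) : Option Bool :=
  let cmp : Int := (if lhs > rhs then 1 else 0) - (if lhs < rhs then 1 else 0)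
  PySem.Dict.get? (PySem.Dict.mk
    [("==", cmp == 0), ("!=", cmp != 0), (">", cmp == 1),
     (">=", cmp != -1), ("<", cmp == -1), ("<=", cmp != 1)]) op

-- B's for-loop with early return "false"; sawValid carried through the recursion
def guardLoopB (value_env : List (String × Int)) :
    List (List (String × String)) → Bool → String
  | [], sawValid => if sawValid then "true" else "unknown"
  | cons :: rest, sawValid =>
    match PySem.Dict.get? (PySem.Dict.mk cons) "variable" with
    | none => guardLoopB value_env rest sawValid
    | some var =>
      match PySem.Dict.get? (PySem.Dict.mk value_env) var with
      | none => guardLoopB value_env rest sawValid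
      | some lhs =>
        match PySem.Dict.get? (PySem.Dict.mk cons) "value" with
        | none => guardLoopB value_env rest sawValid
        | some vs =>
          match PySem.Int.ofStr? vs with
          | none => guardLoopB value_env rest sawValid
          | some rhs =>
            match evalOpB ((PySem.Dict.get? (PySem.Dict.mk cons) "operator").getD "None") lhs rhs with
            | none => guardLoopB value_env rest sawValid
            | some res => if !res then "false" else guardLoopB value_env rest true

def evaluate_guard_truth_py_alt (guard_constraints : List (List (String × String))) (value_env : List (String × Int)) : String :=
  guardLoopB value_env guard_constraints false

-- ===== PRECONDITION & SPEC =====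
def Spec_evaluate_guard_truth_py (guard_constraints : List (List (String × String))) (value_env : List (String × Int)) (out : String) : Prop := out = evaluate_guard_truth_py_alt guard_constraints value_env
instance (guard_constraints : List (List (String × String))) (value_env : List (String × Int)) (out : String) : Decidable (Spec_evaluate_guard_truth_py guard_constraints value_env out) := by unfold Spec_evaluate_guard_truth_py; infer_instance

-- ===== CLAIM (what is proved, stated in full; the proofs are below) =====
def Claim_equal_evaluate_guard_truth_py : Prop := ∀ (guard_constraints : List (List (String × String))) (value_env : List (String × Int)), Dom_evaluate_guard_truth_py guard_constraints value_env → Spec_evaluate_guard_truth_py guard_constraints value_env (evaluate_guard_truth_py guard_constraints value_env)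

-- ===== LEMMAS AND PROOFS =====

-- proof-side: the value (if any) one constraint contributes
def consRes (value_env : List (String × Int)) (cons : List (String × String)) : Option Bool :=
  (PySem.Dict.get? (PySem.Dict.mk cons) "variable").bind fun var =>
  (PySem.Dict.get? (PySem.Dict.mk value_env) var).bind fun lhs =>
  (PySem.Dict.get? (PySem.Dict.mk cons) "value").bind fun vs =>
  (PySem.Int.ofStr? vs).bind fun rhs =>
  evalSimpleConstraintA ((PySem.Dict.get? (PySem.Dict.mk cons) "operator").getD "None") lhs rhs

-- the two operator evaluators agree
theorem evalOpB_eq (op : String) (lhs rhs : Int) :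
    evalOpB op lhs rhs = evalSimpleConstraintA op lhs rhs := by
  rcases lt_trichotomy lhs rhs with h | h | h
  · simp [evalOpB, evalSimpleConstraintA, PySem.Dict.get?,
      h, not_lt_of_gt h, beq_iff_eq, @eq_comm String op]
    split_ifs <;> simp_all <;> omega
  · subst h
    simp [evalOpB, evalSimpleConstraintA, PySem.Dict.get?,
      beq_iff_eq, @eq_comm String op]
    split_ifs <;> simp_all <;> omega
  · simp [evalOpB, evalSimpleConstraintA, PySem.Dict.get?,
      h, not_lt_of_gt h, beq_iff_eq, @eq_comm String op]
    split_ifs <;> simp_all <;> omega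

theorem guardStepA_eq (value_env : List (String × Int)) (known : List Bool)
    (cons : List (String × String)) :
    guardStepA value_env known cons = known ++ (consRes value_env cons).toList := by
  simp only [guardStepA, consRes]
  rcases h1 : PySem.Dict.get? (PySem.Dict.mk cons) "variable" with _ | var <;> simp [h1]
  rcases h2 : PySem.Dict.get? (PySem.Dict.mk value_env) var with _ | lhs <;> simp [h2]
  rcases h3 : PySem.Dict.get? (PySem.Dict.mk cons) "value" with _ | vs <;> simp [h3]
  rcases h4 : PySem.Int.ofStr? vs with _ | rhs <;> simp [h4]
  rcases h5 : evalSimpleConstraintA ((PySem.Dict.get? (PySem.Dict.mk cons) "operator").getD "None") lhs rhs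
    with _ | res <;> simp [h5]

theorem guardLoopB_cons (value_env : List (String × Int))
    (cons : List (String × String)) (rest : List (List (String × String))) (sawValid : Bool) :
    guardLoopB value_env (cons :: rest) sawValid =
      (match consRes value_env cons with
       | none => guardLoopB value_env rest sawValid
       | some res => if !res then "false" else guardLoopB value_env rest true) := by
  simp only [guardLoopB, consRes]
  rcases h1 : PySem.Dict.get? (PySem.Dict.mk cons) "variable" with _ | var <;> simp [h1]
  rcases h2 : PySem.Dict.get? (PySem.Dict.mk value_env) var with _ | lhs <;> simp [h2]
  rcases h3 : PySem.Dict.get? (PySem.Dict.mk cons) "value" with _ | vs <;> simp [h3]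
  rcases h4 : PySem.Int.ofStr? vs with _ | rhs <;> simp [h4]
  simp [evalOpB_eq]

-- A's foldl only ever appends, so it distributes over the start list
theorem foldl_step_append (value_env : List (String × Int)) :
    ∀ (gcs : List (List (String × String))) (k : List Bool),
      gcs.foldl (guardStepA value_env) k = k ++ gcs.foldl (guardStepA value_env) [] := by
  intro gcs
  induction gcs with
  | nil => intro k; simp
  | cons c rest ih =>
    intro k
    rw [List.foldl_cons, List.foldl_cons, ih (guardStepA value_env k c),
      ih (guardStepA value_env [] c), guardStepA_eq, guardStepA_eq value_env []]
    simp

-- B's loop computed from the `known` list A collects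
theorem guardLoopB_eq (value_env : List (String × Int))
    (gcs : List (List (String × String))) (sawValid : Bool) :
    guardLoopB value_env gcs sawValid =
      (let known := gcs.foldl (guardStepA value_env) []
       if known.any (fun v => v == false) then "false"
       else if sawValid || !known.isEmpty then "true" else "unknown") := by
  induction gcs generalizing sawValid with
  | nil => cases sawValid <;> rfl
  | cons c rest ih =>
    rw [guardLoopB_cons]
    have hknown : (c :: rest).foldl (guardStepA value_env) []
        = (consRes value_env c).toList ++ rest.foldl (guardStepA value_env) [] := by
      rw [List.foldl_cons, foldl_step_append, guardStepA_eq]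
      simp
    rcases hc : consRes value_env c with _ | res
    · rw [ih sawValid]
      simp [hknown, hc]
    · cases res
      · simp [hknown, hc]
      · rw [ih true]
        simp [hknown, hc]

-- A's aggregation over `known` equals B's (the trailing "unknown" of A is unreachable)
theorem agg_eq (known : List Bool) :
    (if known.isEmpty then "unknown"
     else if known.all id then "true"
     else if known.any (fun v => v == false) then "false" else "unknown")
    = (if known.any (fun v => v == false) then "false"
       else if !known.isEmpty then "true" else "unknown") := by
  cases known with
  | nil => rfl
  | cons b bs =>
    by_cases hall : (b :: bs).all id = true
    · have hany : (b :: bs).any (fun v => v == false) = false := by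
        simp only [List.any_eq_false]
        intro x hx
        have := List.all_eq_true.mp hall x hx
        simp_all
      simp [hall, hany]
      constructor
      · simpa using List.all_eq_true.mp hall b (List.mem_cons_self ..)
      · intro hmem
        have := List.all_eq_true.mp hall false (List.mem_cons_of_mem b hmem)
        simp at this
    · have hany : (b :: bs).any (fun v => v == false) = true := by
        rcases List.all_eq_false.mp (Bool.eq_false_iff.mpr hall) with ⟨x, hx, hxf⟩
        exact List.any_eq_true.mpr ⟨x, hx, by simp_all⟩
      have hcond : b = false ∨ false ∈ bs := by simpa using hany
      simp [hall, hany, hcond]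

theorem evaluate_guard_truth_py_spec : Claim_equal_evaluate_guard_truth_py := by
  intro gcs env _
  unfold Spec_evaluate_guard_truth_py evaluate_guard_truth_py evaluate_guard_truth_py_alt
  rw [guardLoopB_eq]
  rcases gcs with _ | ⟨c, rest⟩
  · rfl
  · simp only [List.isEmpty_cons, Bool.false_or, if_false]
    exact agg_eq ((c :: rest).foldl (guardStepA env) [])
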